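-- pv_equiv track=rewrite | github.com/pengyu965/ChartReformer | model/eval_metrics.py | process_param_json
-- ===== SOURCE A (Python) =====
-- from copy import deepcopy
--
-- def process_param_json(json_f,
--                        pop_keys=['data_table','chart_title','x_axis_title','y_axis_title']):
--     table = {}
--     params = deepcopy(json_f)
--     for key in pop_keys:
--         if key in params.keys():
--             table[key] = params.pop(key)
--
--     if 'data_table' in table.keys():
--         table['data_table'] = table['data_table'].replace('<0x0A>', '\n')
--     else:
--         table['data_table'] = ""
--
--     return table, params
-- ===== SOURCE B (Python) =====
-- from copy import deepcopy
--
-- def process_param_json(json_f,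
--                        pop_keys=['data_table','chart_title','x_axis_title','y_axis_title']):
--     drop = set(pop_keys)
--     params = {k: deepcopy(v) for k, v in json_f.items() if k not in drop}
--     table = {k: deepcopy(json_f[k]) for k in pop_keys if k in json_f}
--     table['data_table'] = (table['data_table'].replace('<0x0A>', '\n')
--                            if 'data_table' in table else "")
--     return table, params
-- ===== Notes on version B (the rewrite author's own statement) =====
-- stated objective: idiomatic
-- what changed: B replaces A's destructive loop (repeatedly popping keys out of a copied dict) by two non-mutating dict comprehensions: params is built in one pass over the data filtering against a set of pop_keys, and table is gathered by direct lookups; the data_table fallback becomes a conditional expression.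
import Mathlib
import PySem

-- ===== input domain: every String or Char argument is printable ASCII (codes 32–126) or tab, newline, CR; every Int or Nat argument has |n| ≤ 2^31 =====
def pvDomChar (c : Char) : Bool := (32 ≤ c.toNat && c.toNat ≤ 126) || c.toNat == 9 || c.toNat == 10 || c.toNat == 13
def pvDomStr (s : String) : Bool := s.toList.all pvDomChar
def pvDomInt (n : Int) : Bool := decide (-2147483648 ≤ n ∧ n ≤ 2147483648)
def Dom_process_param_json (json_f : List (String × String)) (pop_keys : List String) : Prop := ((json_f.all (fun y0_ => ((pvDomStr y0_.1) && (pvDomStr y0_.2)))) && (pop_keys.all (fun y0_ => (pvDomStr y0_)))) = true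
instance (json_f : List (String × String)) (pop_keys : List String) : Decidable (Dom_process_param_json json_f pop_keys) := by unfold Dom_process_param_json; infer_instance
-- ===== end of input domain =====

-- B partitions the input with two non-mutating dict comprehensions instead of A's pop-loop (idiomatic; same cost).

-- ===== PORT A =====
-- table = {}; params = deepcopy(json_f); for key in pop_keys: if key in params: table[key] = params.pop(key)
def process_param_json (json_f : List (String × String)) (pop_keys : List String) : (List (String × String)) × (List (String × String)) :=
  let st := pop_keys.foldl
    (fun (st : PySem.Dict String String × PySem.Dict String String) key =>
      if st.2.contains key then
        match st.2.pop? key with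
        | some (v, p) => (st.1.insert key v, p)
        | none => st
      else st)
    (PySem.Dict.empty, PySem.Dict.mk json_f)
  let table :=
    if st.1.contains "data_table" then
      st.1.insert "data_table" (PySem.Str.replace (st.1.getD "data_table" "") "<0x0A>" "\n")
    else
      st.1.insert "data_table" ""
  (table.items, st.2.items)

-- ===== PORT B =====
-- drop = set(pop_keys); params = {k: v for k, v in json_f.items() if k not in drop};
-- table = {k: json_f[k] for k in pop_keys if k in json_f}; data_table conditional expression
def process_param_json_alt (json_f : List (String × String)) (pop_keys : List String) : (List (String × String)) × (List (String × String)) :=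
  let drop : PySem.Set String := PySem.Set.ofList pop_keys
  let d : PySem.Dict String String := PySem.Dict.mk json_f
  let params := json_f.foldl
    (fun (p : PySem.Dict String String) kv =>
      if drop.contains kv.1 then p else p.insert kv.1 kv.2)
    PySem.Dict.empty
  let table := pop_keys.foldl
    (fun (t : PySem.Dict String String) k =>
      match d.get? k with
      | some v => t.insert k v
      | none => t)
    PySem.Dict.empty
  let table :=
    if table.contains "data_table" then
      table.insert "data_table" (PySem.Str.replace (table.getD "data_table" "") "<0x0A>" "\n")
    else
      table.insert "data_table" ""
  (table.items, params.items)

-- ===== PRECONDITION & SPEC =====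
-- json_f models a Python dict, whose keys are necessarily unique; association lists with
-- duplicate keys represent no Python input, so Pre_ restricts to distinct keys.
def Pre_process_param_json (json_f : List (String × String)) (pop_keys : List String) : Prop :=
  (json_f.map Prod.fst).Nodup
instance (json_f : List (String × String)) (pop_keys : List String) : Decidable (Pre_process_param_json json_f pop_keys) := by unfold Pre_process_param_json; infer_instance

def pvWitness_process_param_json : (List (String × String)) × List String :=
  ([("data_table", "a<0x0A>b"), ("x", "1")], ["data_table", "chart_title"])

def Spec_process_param_json (json_f : List (String × String)) (pop_keys : List String) (out : (List (String × String)) × (List (String × String))) : Prop := out = process_param_json_alt json_f pop_keys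
instance (json_f : List (String × String)) (pop_keys : List String) (out : (List (String × String)) × (List (String × String))) : Decidable (Spec_process_param_json json_f pop_keys out) := by unfold Spec_process_param_json; infer_instance

-- ===== CLAIM (what is proved, stated in full; the proofs are below) =====
def Claim_equal_process_param_json : Prop := ∀ (json_f : List (String × String)) (pop_keys : List String), Dom_process_param_json json_f pop_keys → Pre_process_param_json json_f pop_keys → Spec_process_param_json json_f pop_keys (process_param_json json_f pop_keys)

-- ===== LEMMAS AND PROOFS =====

-- get? ignores a filter that keeps every entry whose key is k
theorem ppj_get?_filter (l : List (String × String)) (q : String × String → Bool) (k : String)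
    (h : ∀ kv ∈ l, kv.1 = k → q kv = true) :
    (PySem.Dict.mk (l.filter q)).get? k = (PySem.Dict.mk l).get? k := by
  induction l with
  | nil => rfl
  | cons kv rest ih =>
    have ih' := ih (fun x hx hk => h x (List.mem_cons_of_mem _ hx) hk)
    by_cases hk : kv.1 = k
    · have hq : q kv = true := h kv (List.mem_cons_self) hk
      simp [PySem.Dict.get?, List.filter_cons, hq, List.find?_cons, hk]
    · simp only [PySem.Dict.get?] at ih' ⊢
      by_cases hq : q kv = true
      · simpa [List.filter_cons, hq, List.find?_cons, beq_iff_eq, hk] using ih'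
      · simpa [List.filter_cons, hq, List.find?_cons, beq_iff_eq, hk] using ih'

-- if get? returns none, no entry has key k
theorem ppj_no_key (l : List (String × String)) (k : String)
    (h : (PySem.Dict.mk l).get? k = none) : ∀ kv ∈ l, kv.1 ≠ k := by
  intro kv hkv
  simp [PySem.Dict.get?, List.find?_eq_none] at h
  intro hk
  exact absurd ((h kv.1 kv.2 hkv)) (by simp [hk])



-- entries of a dict with unique keys are determined by their key
theorem ppj_key_inj {l : List (String × String)}
    (h : (l.map Prod.fst).Nodup) {p q : String × String}
    (hp : p ∈ l) (hq : q ∈ l) (hk : p.1 = q.1) : p = q := by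
  induction l with
  | nil => cases hp
  | cons r rest ih =>
    rw [List.map_cons] at h
    obtain ⟨h1, h2⟩ := List.nodup_cons.mp h
    rcases List.mem_cons.mp hp with rfl | hp2
    · rcases List.mem_cons.mp hq with rfl | hq2
      · rfl
      · exact absurd (show p.1 ∈ rest.map Prod.fst by
          rw [hk]; exact List.mem_map_of_mem hq2) h1
    · rcases List.mem_cons.mp hq with rfl | hq2
      · exact absurd (show q.1 ∈ rest.map Prod.fst by
          rw [← hk]; exact List.mem_map_of_mem hp2) h1
      · exact ih h2 hp2 hq2

-- inserting the value a key already has (under unique keys) changes nothing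
theorem ppj_insert_self (t : PySem.Dict String String) (k : String) (v : String)
    (hnd : t.keys.Nodup) (hv : t.get? k = some v) : t.insert k v = t := by
  have hc : t.contains k = true := by
    simp [PySem.Dict.contains_eq_isSome_get?, hv]
  have hmem : (k, v) ∈ t.items := PySem.Dict.mem_items_of_get?_eq_some _ hv
  apply PySem.Dict.ext
  simp only [PySem.Dict.insert, hc, if_true]
  have hpt : ∀ p ∈ t.items, (if (p.1 == k) = true then (k, v) else p) = p := by
    intro p hp
    by_cases hpk : p.1 = k
    · have := ppj_key_inj hnd hp hmem (by simpa using hpk)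
      simp only [hpk, beq_self_eq_true, if_true, this]
    · simp [hpk]
  calc List.map (fun p => if (p.1 == k) = true then (k, v) else p) t.items
      = List.map id t.items := List.map_congr_left (by simpa using hpt)
    _ = t.items := List.map_id _

-- get? is none after a filter that removes every entry with key k
theorem ppj_get?_filter_none (l : List (String × String)) (q : String × String → Bool) (k : String)
    (h : ∀ kv ∈ l, kv.1 = k → q kv = false) :
    (PySem.Dict.mk (l.filter q)).get? k = none := by
  induction l with
  | nil => rfl
  | cons kv rest ih =>
    have ih' := ih (fun x hx hk => h x (List.mem_cons_of_mem _ hx) hk)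
    by_cases hk : kv.1 = k
    · have hq := h kv List.mem_cons_self hk
      simpa [List.filter_cons, hq] using ih'
    · by_cases hq : q kv = true
      · simpa [PySem.Dict.get?, List.filter_cons, hq, beq_iff_eq, hk] using
          (by simpa [PySem.Dict.get?] using ih' : _)
      · simpa [List.filter_cons, hq] using ih'


-- the A-loop over pop_keys, related to the B-side table loop and a filter of the data
theorem ppj_main (d : PySem.Dict String String) (hd : d.keys.Nodup) :
    ∀ (ks done : List String) (t : PySem.Dict String String),
    t.keys.Nodup →
    (∀ j, t.get? j = if j ∈ done then d.get? j else none) →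
    ks.foldl
      (fun (st : PySem.Dict String String × PySem.Dict String String) key =>
        if st.2.contains key then
          match st.2.pop? key with
          | some (v, p) => (st.1.insert key v, p)
          | none => st
        else st)
      (t, PySem.Dict.mk (d.items.filter (fun kv => !decide (kv.1 ∈ done))))
    = (ks.foldl
        (fun (t : PySem.Dict String String) k =>
          match d.get? k with
          | some v => t.insert k v
          | none => t) t,
       PySem.Dict.mk (d.items.filter (fun kv => !decide (kv.1 ∈ done ++ ks)))) := by
  intro ks
  induction ks with
  | nil =>
    intro done t _ _
    simp
  | cons k ks ih =>
    intro done t hT hinv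
    by_cases hdk : k ∈ done
    · -- k was already popped: A skips, B re-inserts the same value (a no-op)
      have hPnone : (PySem.Dict.mk (d.items.filter (fun kv => !decide (kv.1 ∈ done)))).get? k = none := by
        apply ppj_get?_filter_none
        intro kv _ hk
        simp [hk, hdk]
      have hcont : (PySem.Dict.mk (d.items.filter (fun kv => !decide (kv.1 ∈ done)))).contains k = false := by
        rw [PySem.Dict.contains_eq_isSome_get?, hPnone]; rfl
      have hfilt : (d.items.filter (fun kv => !decide (kv.1 ∈ done)))
          = (d.items.filter (fun kv => !decide (kv.1 ∈ done ++ [k]))) := by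
        apply List.filter_congr
        intro kv _
        by_cases h2 : kv.1 ∈ done <;> simp [h2, hdk]
        intro h3; rw [h3] at h2; exact h2 hdk
      have hstepA : (if (PySem.Dict.mk (d.items.filter (fun kv => !decide (kv.1 ∈ done)))).contains k = true then
            match (PySem.Dict.mk (d.items.filter (fun kv => !decide (kv.1 ∈ done)))).pop? k with
            | some (v, p) => (t.insert k v, p)
            | none => (t, PySem.Dict.mk (d.items.filter (fun kv => !decide (kv.1 ∈ done))))
          else (t, PySem.Dict.mk (d.items.filter (fun kv => !decide (kv.1 ∈ done)))))
          = (t, PySem.Dict.mk (d.items.filter (fun kv => !decide (kv.1 ∈ done ++ [k])))) := by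
        simp only [hcont, Bool.false_eq_true, if_false]
        rw [hfilt]
      have hstepB : (match d.get? k with
            | some v => t.insert k v
            | none => t) = t := by
        cases hg : d.get? k with
        | none => simp [hg]
        | some v =>
          have hv : t.get? k = some v := by rw [hinv k, if_pos hdk, hg]
          simp only [hg]
          exact ppj_insert_self t k v hT hv
      rw [List.foldl_cons, List.foldl_cons]
      try simp only []
      rw [hstepA, hstepB]
      rw [ih (done ++ [k]) t hT ?_]
      · congr 2
        apply List.filter_congr
        intro kv _
        simp only [List.mem_append, List.mem_cons, List.mem_singleton, List.mem_nil_iff, false_or, or_false, or_assoc]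
      · intro j
        rw [hinv j]
        by_cases hjk : j = k
        · subst hjk
          simp [hdk]
        · simp [hjk]
    · cases hg : d.get? k with
      | some v =>
        -- k still present: A pops it into table, B inserts the same value
        have hPget : (PySem.Dict.mk (d.items.filter (fun kv => !decide (kv.1 ∈ done)))).get? k = some v := by
          rw [ppj_get?_filter]
          · cases d; exact hg
          · intro kv _ hk; simp [hk, hdk]
        have hcont : (PySem.Dict.mk (d.items.filter (fun kv => !decide (kv.1 ∈ done)))).contains k = true := by
          rw [PySem.Dict.contains_eq_isSome_get?, hPget]; rfl
        have herase : (PySem.Dict.mk (d.items.filter (fun kv => !decide (kv.1 ∈ done)))).erase k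
            = PySem.Dict.mk (d.items.filter (fun kv => !decide (kv.1 ∈ done ++ [k]))) := by
          simp only [PySem.Dict.erase, List.filter_filter]
          congr 1
          apply List.filter_congr
          intro kv _
          by_cases h2 : kv.1 ∈ done <;> by_cases h3 : kv.1 = k <;>
            simp [h2, h3]
        have hpop : (PySem.Dict.mk (d.items.filter (fun kv => !decide (kv.1 ∈ done)))).pop? k
            = some (v, PySem.Dict.mk (d.items.filter (fun kv => !decide (kv.1 ∈ done ++ [k])))) := by
          rw [PySem.Dict.pop?, hPget, Option.map_some, herase]
        have hstepA : (if (PySem.Dict.mk (d.items.filter (fun kv => !decide (kv.1 ∈ done)))).contains k = true then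
            match (PySem.Dict.mk (d.items.filter (fun kv => !decide (kv.1 ∈ done)))).pop? k with
            | some (v, p) => (t.insert k v, p)
            | none => (t, PySem.Dict.mk (d.items.filter (fun kv => !decide (kv.1 ∈ done))))
          else (t, PySem.Dict.mk (d.items.filter (fun kv => !decide (kv.1 ∈ done)))))
          = (t.insert k v, PySem.Dict.mk (d.items.filter (fun kv => !decide (kv.1 ∈ done ++ [k])))) := by
          simp only [hcont, if_true, hpop]
        have hstepB : (match d.get? k with
            | some v => t.insert k v
            | none => t) = t.insert k v := by
          simp only [hg]
        rw [List.foldl_cons, List.foldl_cons]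
        try simp only []
        rw [hstepA, hstepB]
        rw [ih (done ++ [k]) (t.insert k v) (PySem.Dict.nodup_keys_insert _ _ _ hT) ?_]
        · congr 2
          apply List.filter_congr
          intro kv _
          simp only [List.mem_append, List.mem_cons, List.mem_singleton, List.mem_nil_iff, false_or, or_false, or_assoc]
        · intro j
          rw [PySem.Dict.get?_insert]
          by_cases hjk : j = k
          · subst hjk
            simp [hg]
          · rw [if_neg hjk, hinv j]
            simp [hjk]
      | none =>
        -- k absent from the data entirely: both sides skip
        have hnok : ∀ kv ∈ d.items, kv.1 ≠ k := by
          apply ppj_no_key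
          cases d; exact hg
        have hPnone : (PySem.Dict.mk (d.items.filter (fun kv => !decide (kv.1 ∈ done)))).get? k = none := by
          rw [ppj_get?_filter]
          · cases d; exact hg
          · intro kv _ hk; simp [hk, hdk]
        have hcont : (PySem.Dict.mk (d.items.filter (fun kv => !decide (kv.1 ∈ done)))).contains k = false := by
          rw [PySem.Dict.contains_eq_isSome_get?, hPnone]; rfl
        have hfilt : (d.items.filter (fun kv => !decide (kv.1 ∈ done)))
            = (d.items.filter (fun kv => !decide (kv.1 ∈ done ++ [k]))) := by
          apply List.filter_congr
          intro kv hkv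
          have := hnok kv hkv
          simp [List.mem_append, this]
        have hstepA : (if (PySem.Dict.mk (d.items.filter (fun kv => !decide (kv.1 ∈ done)))).contains k = true then
            match (PySem.Dict.mk (d.items.filter (fun kv => !decide (kv.1 ∈ done)))).pop? k with
            | some (v, p) => (t.insert k v, p)
            | none => (t, PySem.Dict.mk (d.items.filter (fun kv => !decide (kv.1 ∈ done))))
          else (t, PySem.Dict.mk (d.items.filter (fun kv => !decide (kv.1 ∈ done)))))
          = (t, PySem.Dict.mk (d.items.filter (fun kv => !decide (kv.1 ∈ done ++ [k])))) := by
          simp only [hcont, Bool.false_eq_true, if_false]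
          rw [hfilt]
        have hstepB : (match d.get? k with
            | some v => t.insert k v
            | none => t) = t := by
          simp only [hg]
        rw [List.foldl_cons, List.foldl_cons]
        try simp only []
        rw [hstepA, hstepB]
        rw [ih (done ++ [k]) t hT ?_]
        · congr 2
          apply List.filter_congr
          intro kv _
          simp only [List.mem_append, List.mem_cons, List.mem_singleton, List.mem_nil_iff, false_or, or_false, or_assoc]
        · intro j
          rw [hinv j]
          by_cases hjk : j = k
          · subst hjk
            simp [hdk, hg]
          · simp [hjk]

-- set membership test = list membership test
theorem ppj_set_contains (ks : List String) (x : String) :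
    PySem.Set.contains (PySem.Set.ofList ks) x = decide (x ∈ ks) := by
  rw [PySem.Set.contains, List.contains_eq_mem]
  by_cases h : x ∈ ks
  · simp [PySem.Set.mem_ofList, h]
  · simp [PySem.Set.mem_ofList, h]

-- the B-side params loop is a filter of the data (keys being unique)
theorem ppj_params (keep : PySem.Set String) :
    ∀ (l : List (String × String)) (acc : PySem.Dict String String),
    (acc.keys ++ l.map Prod.fst).Nodup →
    l.foldl (fun (p : PySem.Dict String String) kv =>
        if PySem.Set.contains keep kv.1 then p else p.insert kv.1 kv.2) acc
    = PySem.Dict.mk (acc.items ++ l.filter (fun kv => !PySem.Set.contains keep kv.1)) := by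
  intro l
  induction l with
  | nil =>
    intro acc _
    cases acc
    simp
  | cons kv rest ih =>
    intro acc h
    rw [List.foldl_cons]
    by_cases hk : PySem.Set.contains keep kv.1 = true
    · rw [if_pos hk]
      have h' : (acc.keys ++ rest.map Prod.fst).Nodup := by
        refine List.Nodup.sublist ?_ h
        exact List.Sublist.append_left (List.sublist_cons_self _ _) _
      rw [ih acc h']
      simp only [List.filter_cons, hk, Bool.not_true, Bool.false_eq_true, if_false]
    · rw [if_neg hk]
      have hmem : kv.1 ∉ acc.keys := by
        rw [List.nodup_append] at h
        intro hx
        exact h.2.2 kv.1 hx kv.1 (by simp) rfl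
      have hc : acc.contains kv.1 = false := by
        rw [PySem.Dict.contains_eq_decide_mem_keys]
        simpa using hmem
      have hins : acc.insert kv.1 kv.2 = PySem.Dict.mk (acc.items ++ [(kv.1, kv.2)]) := by
        simp only [PySem.Dict.insert, hc, Bool.false_eq_true, if_false]
      rw [hins]
      have h' : ((PySem.Dict.mk (acc.items ++ [(kv.1, kv.2)])).keys ++ rest.map Prod.fst).Nodup := by
        have : (PySem.Dict.mk (acc.items ++ [(kv.1, kv.2)])).keys = acc.keys ++ [kv.1] := by
          simp [PySem.Dict.keys]
        rw [this, List.append_assoc]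
        simpa using h
      rw [ih _ h']
      have hk' : keep.contains kv.1 = false := by
        cases hcc : keep.contains kv.1
        · rfl
        · exact absurd hcc hk
      simp only [List.filter_cons, hk', Bool.not_false, if_true, List.append_assoc,
        List.singleton_append]

-- A equals B on dicts (unique keys)
theorem ppj_equiv (json_f : List (String × String)) (pop_keys : List String)
    (hnd : (json_f.map Prod.fst).Nodup) :
    process_param_json json_f pop_keys = process_param_json_alt json_f pop_keys := by
  have hd : (PySem.Dict.mk json_f).keys.Nodup := by simpa [PySem.Dict.keys] using hnd
  have h0 : json_f.filter (fun kv => !decide (kv.1 ∈ ([] : List String))) = json_f := by simp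
  have hmain := ppj_main (PySem.Dict.mk json_f) hd pop_keys [] PySem.Dict.empty
    PySem.Dict.nodup_keys_empty
    (by intro j; simp [PySem.Dict.get?_empty])
  rw [show (PySem.Dict.mk ((PySem.Dict.mk json_f).items.filter
        (fun kv => !decide (kv.1 ∈ ([] : List String))))) = PySem.Dict.mk json_f from by
      simpa using congrArg PySem.Dict.mk h0] at hmain
  have hparams := ppj_params (PySem.Set.ofList pop_keys) json_f PySem.Dict.empty
    (by simpa [PySem.Dict.keys, PySem.Dict.empty] using hnd)
  have hfeq : json_f.filter (fun kv => !PySem.Set.contains (PySem.Set.ofList pop_keys) kv.1)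
      = json_f.filter (fun kv => !decide (kv.1 ∈ pop_keys)) := by
    apply List.filter_congr
    intro kv _
    rw [ppj_set_contains]
  simp only [process_param_json, process_param_json_alt]
  rw [hmain, hparams, hfeq]
  simp [PySem.Dict.empty]
  rfl

-- ===== VERDICT (by name: the statement is the Claim_ definition above) =====
theorem process_param_json_spec : Claim_equal_process_param_json := by
  intro json_f pop_keys _ hpre
  unfold Pre_process_param_json at hpre
  unfold Spec_process_param_json
  exact ppj_equiv json_f pop_keys hpre
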